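-- pv_equiv track=rewrite | github.com/emitomzzzz/KCD2Gamble | dicegame/engine.py | normalize_selection_indices
-- ===== SOURCE A (Python) =====
-- from typing import Iterable
--
-- def normalize_selection_indices(indices: Iterable[int], max_index: int) -> tuple[int, ...]:
--     normalized = tuple(sorted(indices))
--     if not normalized:
--         raise ValueError("At least one die must be selected.")
--
--     for index in normalized:
--         if index < 0 or index >= max_index:
--             raise ValueError("Die index out of range.")
--
--     if len(set(normalized)) != len(normalized):
--         raise ValueError("Die indices cannot be duplicated.")
--
--     return normalized
-- ===== SOURCE B (Python) =====
-- def _msort(items):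
--     # top-down merge sort; also reports whether two equal elements ever met
--     if len(items) <= 1:
--         return items, False
--     mid = len(items) // 2
--     left, dl = _msort(items[:mid])
--     right, dr = _msort(items[mid:])
--     merged = []
--     dup = False
--     i = j = 0
--     while i < len(left) and j < len(right):
--         if left[i] < right[j]:
--             merged.append(left[i]); i += 1
--         elif right[j] < left[i]:
--             merged.append(right[j]); j += 1
--         else:
--             dup = True
--             merged.append(left[i]); merged.append(right[j]); i += 1; j += 1
--     merged.extend(left[i:])
--     merged.extend(right[j:])
--     return merged, dl or dr or dup
--
-- def normalize_selection_indices(indices, max_index):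
--     items = list(indices)
--     if not items:
--         raise ValueError("At least one die must be selected.")
--     for index in items:
--         if index < 0 or index >= max_index:
--             raise ValueError("Die index out of range.")
--     ordered, has_dup = _msort(items)
--     if has_dup:
--         raise ValueError("Die indices cannot be duplicated.")
--     return tuple(ordered)
-- ===== Notes on version B (the rewrite author's own statement) =====
-- stated objective: alternative
-- what changed: B replaces the builtin sort plus set-size duplicate comparison by a hand-written top-down merge sort that detects duplicates as a side product of the merge (equal heads set a flag), so no set is built and sorting and duplicate detection are fused into one recursive procedure.
import Mathlib
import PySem

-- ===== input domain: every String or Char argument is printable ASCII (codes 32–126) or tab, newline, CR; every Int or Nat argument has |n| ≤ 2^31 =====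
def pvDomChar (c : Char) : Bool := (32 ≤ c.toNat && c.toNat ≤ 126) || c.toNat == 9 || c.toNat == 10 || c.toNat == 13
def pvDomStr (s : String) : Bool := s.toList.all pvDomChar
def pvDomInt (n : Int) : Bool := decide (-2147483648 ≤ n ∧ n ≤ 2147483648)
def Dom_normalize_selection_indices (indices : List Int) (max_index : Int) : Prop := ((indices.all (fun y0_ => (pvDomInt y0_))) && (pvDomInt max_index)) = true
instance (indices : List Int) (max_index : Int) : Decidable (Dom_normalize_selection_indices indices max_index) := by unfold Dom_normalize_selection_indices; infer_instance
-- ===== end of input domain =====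

-- B fuses sorting and duplicate detection into a hand-written top-down merge sort
-- (equal heads during a merge set a flag), instead of A's builtin sort, per-element
-- bounds loop and set-size comparison (alternative algorithm, same cost).


-- ===== PORT A =====
-- raising branches (excluded by Pre_) return []
def normalize_selection_indices (indices : List Int) (max_index : Int) : List Int :=
  let normalized := PySem.List.sorted indices (fun x => x) false
  if normalized = [] then []                                               -- raise ValueError
  else if normalized.any (fun i => i < 0 || max_index ≤ i) then []         -- raise ValueError
  else if (PySem.Set.ofList normalized).length ≠ normalized.length then [] -- raise ValueError
  else normalized

-- ===== PORT B =====
-- the merge while-loop of _msort: merges two runs, flag true when equal heads meet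
def pvMerge : List Int → List Int → List Int × Bool
  | [], r => (r, false)
  | l, [] => (l, false)
  | a :: l, b :: r =>
    if a < b then
      let (m, d) := pvMerge l (b :: r); (a :: m, d)
    else if b < a then
      let (m, d) := pvMerge (a :: l) r; (b :: m, d)
    else
      let (m, d) := pvMerge l r; (a :: b :: m, true || d)

-- _msort: top-down merge sort returning (sorted list, duplicate flag)
def pvMsort (items : List Int) : List Int × Bool :=
  if _h : items.length ≤ 1 then (items, false)
  else
    let mid := items.length / 2
    let (left, dl) := pvMsort (items.take mid)
    let (right, dr) := pvMsort (items.drop mid)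
    let (merged, dup) := pvMerge left right
    (merged, dl || dr || dup)
termination_by items.length
decreasing_by
  · simp [List.length_take]; omega
  · simp [List.length_drop]; omega

def normalize_selection_indices_alt (indices : List Int) (max_index : Int) : List Int :=
  if indices = [] then []                                                  -- raise ValueError
  else if indices.any (fun i => i < 0 || max_index ≤ i) then []            -- raise ValueError
  else
    let (ordered, has_dup) := pvMsort indices
    if has_dup then []                                                     -- raise ValueError
    else ordered

-- ===== PRECONDITION & SPEC =====
-- exactly the inputs on which A returns normally (no ValueError)
def Pre_normalize_selection_indices (indices : List Int) (max_index : Int) : Prop :=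
  indices ≠ [] ∧ (∀ i ∈ indices, 0 ≤ i ∧ i < max_index) ∧ indices.Nodup
instance (indices : List Int) (max_index : Int) : Decidable (Pre_normalize_selection_indices indices max_index) := by unfold Pre_normalize_selection_indices; infer_instance
def pvWitness_normalize_selection_indices : List Int × Int := ([2, 0, 1], 5)

def Spec_normalize_selection_indices (indices : List Int) (max_index : Int) (out : List Int) : Prop := out = normalize_selection_indices_alt indices max_index
instance (indices : List Int) (max_index : Int) (out : List Int) : Decidable (Spec_normalize_selection_indices indices max_index out) := by unfold Spec_normalize_selection_indices; infer_instance

-- ===== CLAIM (what is proved, stated in full; the proofs are below) =====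
def Claim_equal_normalize_selection_indices : Prop := ∀ (indices : List Int) (max_index : Int), Dom_normalize_selection_indices indices max_index → Pre_normalize_selection_indices indices max_index → Spec_normalize_selection_indices indices max_index (normalize_selection_indices indices max_index)

-- ===== LEMMAS AND PROOFS =====

-- the merge output is a permutation of the two inputs together
theorem pvMerge_perm : ∀ l r : List Int, (pvMerge l r).1.Perm (l ++ r) := by
  intro l r
  fun_induction pvMerge l r with
  | case1 r => simp
  | case2 l h => simp
  | case3 a l b r hab m d heq ih =>
    rw [heq] at ih
    exact List.Perm.cons a ih
  | case4 a l b r hab hba m d heq ih =>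
    rw [heq] at ih
    exact (List.Perm.cons b ih).trans List.perm_middle.symm
  | case5 a l b r hab hba m d heq ih =>
    rw [heq] at ih
    exact (List.Perm.cons a (List.Perm.cons b ih)).trans
      (List.Perm.cons a List.perm_middle.symm)

-- merging two sorted runs gives a sorted run
theorem pvMerge_sorted : ∀ l r : List Int, l.Pairwise (· ≤ ·) → r.Pairwise (· ≤ ·) →
    (pvMerge l r).1.Pairwise (· ≤ ·) := by
  intro l r hl hr
  fun_induction pvMerge l r with
  | case1 r => simpa
  | case2 l h => simpa
  | case3 a l b r hab m d heq ih =>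
    have hperm := pvMerge_perm l (b :: r)
    rw [heq] at ih hperm
    refine List.pairwise_cons.mpr ⟨?_, ih (List.pairwise_cons.mp hl).2 hr⟩
    intro x hx
    rcases List.mem_append.mp (hperm.mem_iff.mp hx) with h1 | h1
    · exact (List.pairwise_cons.mp hl).1 x h1
    · rcases List.mem_cons.mp h1 with rfl | h2
      · exact le_of_lt hab
      · exact le_trans (le_of_lt hab) ((List.pairwise_cons.mp hr).1 x h2)
  | case4 a l b r hab hba m d heq ih =>
    have hperm := pvMerge_perm (a :: l) r
    rw [heq] at ih hperm
    refine List.pairwise_cons.mpr ⟨?_, ih hl (List.pairwise_cons.mp hr).2⟩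
    intro x hx
    rcases List.mem_append.mp (hperm.mem_iff.mp hx) with h1 | h1
    · rcases List.mem_cons.mp h1 with rfl | h2
      · exact le_of_lt hba
      · exact le_trans (le_of_lt hba) ((List.pairwise_cons.mp hl).1 x h2)
    · exact (List.pairwise_cons.mp hr).1 x h1
  | case5 a l b r hab hba m d heq ih =>
    have heqab : a = b := le_antisymm (not_lt.mp hba) (not_lt.mp hab)
    have hperm := pvMerge_perm l r
    rw [heq] at ih hperm
    have hrec := ih (List.pairwise_cons.mp hl).2 (List.pairwise_cons.mp hr).2
    have hbnd : ∀ x ∈ m, b ≤ x := by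
      intro x hx
      rcases List.mem_append.mp (hperm.mem_iff.mp hx) with h2 | h2
      · exact heqab ▸ (List.pairwise_cons.mp hl).1 x h2
      · exact (List.pairwise_cons.mp hr).1 x h2
    refine List.pairwise_cons.mpr ⟨?_, List.pairwise_cons.mpr ⟨hbnd, hrec⟩⟩
    intro x hx
    rcases List.mem_cons.mp hx with rfl | h1
    · exact le_of_eq heqab
    · exact heqab ▸ hbnd x h1

-- disjoint runs never trigger the duplicate flag
theorem pvMerge_flag : ∀ l r : List Int, l.Disjoint r → (pvMerge l r).2 = false := by
  intro l r hd
  fun_induction pvMerge l r with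
  | case1 r => rfl
  | case2 l h => rfl
  | case3 a l b r hab m d heq ih =>
    have := ih (fun x hx hx' => hd (List.mem_cons_of_mem a hx) hx')
    rw [heq] at this
    exact this
  | case4 a l b r hab hba m d heq ih =>
    have := ih (fun x hx hx' => hd hx (List.mem_cons_of_mem b hx'))
    rw [heq] at this
    exact this
  | case5 a l b r hab hba m d heq ih =>
    exfalso
    exact hd List.mem_cons_self
      (by rw [le_antisymm (not_lt.mp hba) (not_lt.mp hab)]; exact List.mem_cons_self)

-- pvMsort returns a sorted permutation, with a false flag on duplicate-free input
theorem pvMsort_spec : ∀ (n : Nat) (items : List Int), items.length ≤ n →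
    (pvMsort items).1.Perm items ∧ (pvMsort items).1.Pairwise (· ≤ ·) ∧
    (items.Nodup → (pvMsort items).2 = false) := by
  intro n
  induction n with
  | zero =>
    intro items hlen
    obtain rfl := List.length_eq_zero_iff.mp (Nat.le_zero.mp hlen)
    rw [pvMsort]
    simp
  | succ k ih =>
    intro items hlen
    rw [pvMsort]
    by_cases h : items.length ≤ 1
    · simp only [dif_pos h]
      refine ⟨List.Perm.refl _, ?_, ?_⟩
      · match items, h with
        | [], _ => simp
        | [a], _ => simp
      · intro _
        trivial
    · simp only [dif_neg h]
      have hlen2 : 2 ≤ items.length := by omega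
      have htk : (items.take (items.length / 2)).length ≤ k := by
        simp [List.length_take]; omega
      have hdk : (items.drop (items.length / 2)).length ≤ k := by
        simp [List.length_drop]; omega
      obtain ⟨pl, sl, fl⟩ := ih (items.take (items.length / 2)) htk
      obtain ⟨pr, sr, fr⟩ := ih (items.drop (items.length / 2)) hdk
      rcases hL : pvMsort (items.take (items.length / 2)) with ⟨left, dl⟩
      rcases hR : pvMsort (items.drop (items.length / 2)) with ⟨right, dr⟩
      rcases hM : pvMerge left right with ⟨merged, dup⟩
      rw [hL] at pl sl fl; rw [hR] at pr sr fr
      simp only at pl sl fl pr sr fr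
      have hmp := pvMerge_perm left right
      have hms := pvMerge_sorted left right sl sr
      rw [hM] at hmp hms
      refine ⟨?_, hms, ?_⟩
      · exact hmp.trans ((pl.append pr).trans (by rw [List.take_append_drop]))
      · intro hnd
        have hnd' : (items.take (items.length / 2) ++ items.drop (items.length / 2)).Nodup := by
          rw [List.take_append_drop]; exact hnd
        have hdisj : left.Disjoint right := fun x hx hx' =>
          (List.disjoint_of_nodup_append hnd') (pl.mem_iff.mp hx) (pr.mem_iff.mp hx')
        have hmf : dup = false := by
          have := pvMerge_flag left right hdisj
          rw [hM] at this
          simpa using this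
        rw [fl (List.nodup_append.mp hnd').1, fr (List.nodup_append.mp hnd').2.1, hmf]
        rfl

-- ===== VERDICT (by name: the statement is the Claim_ definition above) =====
theorem normalize_selection_indices_spec : Claim_equal_normalize_selection_indices := by
  intro indices max_index _ hpre
  obtain ⟨hne, hbnd, hnd⟩ := hpre
  unfold Spec_normalize_selection_indices normalize_selection_indices normalize_selection_indices_alt
  obtain ⟨hperm, hsorted, hflag⟩ := pvMsort_spec indices.length indices le_rfl
  -- both sides reduce to PySem.List.sorted indices id false
  have hsortEq : PySem.List.sorted indices (fun x => x) false = (pvMsort indices).1 :=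
    PySem.List.sorted_id_eq_of_perm_of_pairwise indices (pvMsort indices).1 hperm hsorted
  have hany : indices.any (fun i => i < 0 || max_index ≤ i) = false := by
    simp only [List.any_eq_false]
    intro i hi
    have := hbnd i hi
    simp; omega
  have hanyS : (PySem.List.sorted indices (fun x => x) false).any
      (fun i => i < 0 || max_index ≤ i) = false := by
    simp only [List.any_eq_false] at hany ⊢
    intro i hi
    exact hany i ((PySem.List.sorted_perm ..).mem_iff.mp hi)
  have hsne : PySem.List.sorted indices (fun x => x) false ≠ [] := by
    intro h0
    rw [PySem.List.sorted_eq_nil_iff] at h0; exact hne h0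
  have hsnd : (PySem.List.sorted indices (fun x => x) false).Nodup :=
    (PySem.List.sorted_perm ..).nodup_iff.mpr hnd
  have hof : (PySem.Set.ofList (PySem.List.sorted indices (fun x => x) false)).length
      = (PySem.List.sorted indices (fun x => x) false).length :=
    congrArg List.length (PySem.Set.ofList_eq_self_of_nodup _ hsnd)
  simp only [hne, hany, hanyS, hof, if_neg hsne]
  simp [hflag hnd, hsortEq]
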